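-- pv_equiv track=rewrite | github.com/DSafr2506/work_with_timeseries | scripts/baseline_solution.py | detect_horizon
-- ===== SOURCE A (Python) =====
-- from typing import Dict, List, Tuple, Optional
-- from typing import Iterable, List, Tuple, Dict, Optional
--
-- def detect_horizon(event_types: Dict[str, int]) -> str:
--     if any(k in event_types for k in ['EARN', 'DIV']):
--         return 'd1'
--     if any(k in event_types for k in ['GUIDE', 'PROD', 'MGMT']):
--         return 'w1'
--     if any(k in event_types for k in ['REG', 'MA']):
--         return 'm1'
--     if 'MACRO' in event_types:
--         return 'w1'
--     return 'd1'
-- ===== SOURCE B (Python) =====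
-- PRIORITY = {
--     'EARN': (0, 'd1'), 'DIV': (0, 'd1'),
--     'GUIDE': (1, 'w1'), 'PROD': (1, 'w1'), 'MGMT': (1, 'w1'),
--     'REG': (2, 'm1'), 'MA': (2, 'm1'),
--     'MACRO': (3, 'w1'),
-- }
--
-- def detect_horizon(event_types):
--     best = (4, 'd1')
--     for k in event_types:
--         p = PRIORITY.get(k)
--         if p is not None and p[0] < best[0]:
--             best = p
--     return best[1]
-- ===== Notes on version B (the rewrite author's own statement) =====
-- stated objective: alternative
-- what changed: Replaces the chain of fixed-category membership tests (each scanning the dict) by a single pass over the input's keys that keeps the minimum-priority match in a rank/label table, defaulting to 'd1'.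
import Mathlib
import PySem

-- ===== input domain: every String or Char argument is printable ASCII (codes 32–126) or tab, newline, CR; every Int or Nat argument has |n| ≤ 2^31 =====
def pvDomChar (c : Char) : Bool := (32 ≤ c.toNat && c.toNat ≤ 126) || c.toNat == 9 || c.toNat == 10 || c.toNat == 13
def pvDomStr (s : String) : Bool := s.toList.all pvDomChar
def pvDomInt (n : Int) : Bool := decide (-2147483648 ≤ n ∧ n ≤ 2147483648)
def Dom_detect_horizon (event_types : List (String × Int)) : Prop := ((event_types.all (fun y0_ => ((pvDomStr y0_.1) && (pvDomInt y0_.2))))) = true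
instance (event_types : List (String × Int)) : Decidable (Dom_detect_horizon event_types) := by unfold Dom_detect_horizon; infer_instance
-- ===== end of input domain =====

-- B replaces A's ordered fixed-category membership tests by one pass over the input's keys
-- keeping the minimum-rank match in a priority table (alternative decomposition, same cost).


-- ===== PORT A =====
def detect_horizon (event_types : List (String × Int)) : String :=
  if (["EARN", "DIV"] : List String).any (fun k => event_types.any (fun kv => kv.1 == k)) then "d1"
  else if (["GUIDE", "PROD", "MGMT"] : List String).any (fun k => event_types.any (fun kv => kv.1 == k)) then "w1"
  else if (["REG", "MA"] : List String).any (fun k => event_types.any (fun kv => kv.1 == k)) then "m1"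
  else if event_types.any (fun kv => kv.1 == "MACRO") then "w1"
  else "d1"

-- ===== PORT B =====
def pvPriority : PySem.Dict String (Int × String) :=
  PySem.Dict.ofList
    [("EARN", (0, "d1")), ("DIV", (0, "d1")),
     ("GUIDE", (1, "w1")), ("PROD", (1, "w1")), ("MGMT", (1, "w1")),
     ("REG", (2, "m1")), ("MA", (2, "m1")),
     ("MACRO", (3, "w1"))]

def detect_horizon_alt (event_types : List (String × Int)) : String :=
  (event_types.foldl (fun best kv =>
      match pvPriority.get? kv.1 with
      | some p => if p.1 < best.1 then p else best
      | none => best) ((4 : Int), "d1")).2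

-- ===== PRECONDITION & SPEC =====
def Spec_detect_horizon (event_types : List (String × Int)) (out : String) : Prop := out = detect_horizon_alt event_types
instance (event_types : List (String × Int)) (out : String) : Decidable (Spec_detect_horizon event_types out) := by unfold Spec_detect_horizon; infer_instance

-- ===== CLAIM (what is proved, stated in full; the proofs are below) =====
def Claim_equal_detect_horizon : Prop := ∀ (event_types : List (String × Int)), Dom_detect_horizon event_types → Spec_detect_horizon event_types (detect_horizon event_types)

-- ===== LEMMAS AND PROOFS =====

/-- rank of a key in B's priority table (4 = absent). -/
def pvRank (k : String) : Int :=
  if k = "EARN" ∨ k = "DIV" then 0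
  else if k = "GUIDE" ∨ k = "PROD" ∨ k = "MGMT" then 1
  else if k = "REG" ∨ k = "MA" then 2
  else if k = "MACRO" then 3
  else 4

/-- canonical accumulator state for a given rank. -/
def pvState (r : Int) : Int × String :=
  (r, if r = 0 then "d1" else if r = 1 then "w1" else if r = 2 then "m1" else if r = 3 then "w1" else "d1")

def pvM (event_types : List (String × Int)) (r : Int) : Int :=
  event_types.foldl (fun r kv => min r (pvRank kv.1)) r

lemma pvRank_bounds (k : String) : 0 ≤ pvRank k ∧ pvRank k ≤ 4 := by
  unfold pvRank; split_ifs <;> norm_num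

lemma pvPriority_get? (k : String) :
    pvPriority.get? k = if pvRank k = 4 then none else some (pvState (pvRank k)) := by
  by_cases hE : k = "EARN"; · subst hE; decide
  by_cases hD : k = "DIV"; · subst hD; decide
  by_cases hG : k = "GUIDE"; · subst hG; decide
  by_cases hP : k = "PROD"; · subst hP; decide
  by_cases hMG : k = "MGMT"; · subst hMG; decide
  by_cases hR : k = "REG"; · subst hR; decide
  by_cases hMA : k = "MA"; · subst hMA; decide
  by_cases hMC : k = "MACRO"; · subst hMC; decide
  have hr : pvRank k = 4 := by unfold pvRank; simp [hE, hD, hG, hP, hMG, hR, hMA, hMC]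
  have hm : pvPriority = PySem.Dict.mk
      [("EARN", ((0 : Int), "d1")), ("DIV", (0, "d1")),
       ("GUIDE", (1, "w1")), ("PROD", (1, "w1")), ("MGMT", (1, "w1")),
       ("REG", (2, "m1")), ("MA", (2, "m1")),
       ("MACRO", (3, "w1"))] := by decide
  have nE : ("EARN" : String) ≠ k := fun h => hE h.symm
  have nD : ("DIV" : String) ≠ k := fun h => hD h.symm
  have nG : ("GUIDE" : String) ≠ k := fun h => hG h.symm
  have nP : ("PROD" : String) ≠ k := fun h => hP h.symm
  have nMG : ("MGMT" : String) ≠ k := fun h => hMG h.symm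
  have nR : ("REG" : String) ≠ k := fun h => hR h.symm
  have nMA : ("MA" : String) ≠ k := fun h => hMA h.symm
  have nMC : ("MACRO" : String) ≠ k := fun h => hMC h.symm
  rw [hr, hm]
  simp [PySem.Dict.get?, nE, nD, nG, nP, nMG, nR, nMA, nMC]

lemma pvStep_eq (r : Int) (hr : 0 ≤ r ∧ r ≤ 4) (kv : String × Int) :
    (match pvPriority.get? kv.1 with
      | some p => if p.1 < (pvState r).1 then p else pvState r
      | none => pvState r) = pvState (min r (pvRank kv.1)) := by
  rw [pvPriority_get?]
  rcases pvRank_bounds kv.1 with ⟨hb0, hb4⟩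
  by_cases h4 : pvRank kv.1 = 4
  · simp [h4, pvState, min_eq_left hr.2]
  · simp only [h4, if_false]
    by_cases hlt : pvRank kv.1 < r
    · simp [pvState, hlt, min_eq_right (le_of_lt hlt)]
    · simp [pvState, hlt, min_eq_left (le_of_not_gt hlt)]

lemma pvFold_eq (event_types : List (String × Int)) :
    ∀ r : Int, 0 ≤ r → r ≤ 4 →
    event_types.foldl (fun best kv =>
      match pvPriority.get? kv.1 with
      | some p => if p.1 < best.1 then p else best
      | none => best) (pvState r) = pvState (pvM event_types r) := by
  induction event_types with
  | nil => intro r _ _; rfl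
  | cons kv et ih =>
    intro r h0 h4
    rcases pvRank_bounds kv.1 with ⟨hb0, hb4⟩
    have h := pvStep_eq r ⟨h0, h4⟩ kv
    simp only [List.foldl_cons]
    rw [h, ih (min r (pvRank kv.1)) (le_min h0 hb0) (min_le_of_left_le h4)]
    rfl

lemma pvM_le_init (event_types : List (String × Int)) :
    ∀ r : Int, pvM event_types r ≤ r := by
  induction event_types with
  | nil => intro r; exact le_refl r
  | cons kv et ih =>
    intro r
    exact le_trans (ih (min r (pvRank kv.1))) (min_le_left _ _)

lemma pvM_le_mem (event_types : List (String × Int)) :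
    ∀ r : Int, ∀ kv ∈ event_types, pvM event_types r ≤ pvRank kv.1 := by
  induction event_types with
  | nil => intro _ kv h; exact absurd h (List.not_mem_nil)
  | cons kv0 et ih =>
    intro r kv hmem
    rcases List.mem_cons.1 hmem with h | h
    · subst h
      exact le_trans (pvM_le_init et _) (min_le_right _ _)
    · exact ih _ kv h

lemma pvM_attained (event_types : List (String × Int)) :
    ∀ r : Int, pvM event_types r = r ∨ ∃ kv ∈ event_types, pvM event_types r = pvRank kv.1 := by
  induction event_types with
  | nil => intro r; exact Or.inl rfl
  | cons kv0 et ih =>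
    intro r
    rcases ih (min r (pvRank kv0.1)) with h | ⟨kv, hmem, heq⟩
    · rcases min_cases r (pvRank kv0.1) with ⟨he, _⟩ | ⟨he, _⟩
      · exact Or.inl (by simpa [pvM, he] using h)
      · exact Or.inr ⟨kv0, List.mem_cons_self, by simpa [pvM, he] using h⟩
    · exact Or.inr ⟨kv, List.mem_cons_of_mem _ hmem, heq⟩

lemma pvRank_eq_zero_iff (k : String) : pvRank k = 0 ↔ k = "EARN" ∨ k = "DIV" := by
  constructor
  · intro h; unfold pvRank at h; split_ifs at h <;> first | assumption | omega
  · intro h; rcases h with h | h <;> subst h <;> decide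

lemma pvRank_eq_one_iff (k : String) : pvRank k = 1 ↔ k = "GUIDE" ∨ k = "PROD" ∨ k = "MGMT" := by
  constructor
  · intro h; unfold pvRank at h; split_ifs at h <;> first | assumption | omega
  · intro h; rcases h with h | h | h <;> subst h <;> decide

lemma pvRank_eq_two_iff (k : String) : pvRank k = 2 ↔ k = "REG" ∨ k = "MA" := by
  constructor
  · intro h; unfold pvRank at h; split_ifs at h <;> first | assumption | omega
  · intro h; rcases h with h | h <;> subst h <;> decide

lemma pvRank_eq_three_iff (k : String) : pvRank k = 3 ↔ k = "MACRO" := by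
  constructor
  · intro h; unfold pvRank at h; split_ifs at h <;> first | assumption | omega
  · intro h; subst h; decide

lemma detect_horizon_alt_eq (event_types : List (String × Int)) :
    detect_horizon_alt event_types = (pvState (pvM event_types 4)).2 := by
  unfold detect_horizon_alt
  have h4 : ((4 : Int), ("d1" : String)) = pvState 4 := rfl
  rw [h4, pvFold_eq event_types 4 (by norm_num) (le_refl 4)]

lemma pvCond0_iff (et : List (String × Int)) :
    (["EARN", "DIV"] : List String).any (fun k => et.any (fun kv => kv.1 == k)) = true ↔
      ∃ kv ∈ et, pvRank kv.1 = 0 := by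
  simp only [List.any_cons, List.any_nil, Bool.or_false, Bool.or_eq_true, List.any_eq_true,
    beq_iff_eq, pvRank_eq_zero_iff]
  constructor
  · rintro (⟨x, hx, h⟩ | ⟨x, hx, h⟩)
    · exact ⟨x, hx, Or.inl h⟩
    · exact ⟨x, hx, Or.inr h⟩
  · rintro ⟨x, hx, h | h⟩
    · exact Or.inl ⟨x, hx, h⟩
    · exact Or.inr ⟨x, hx, h⟩

lemma pvCond1_iff (et : List (String × Int)) :
    (["GUIDE", "PROD", "MGMT"] : List String).any (fun k => et.any (fun kv => kv.1 == k)) = true ↔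
      ∃ kv ∈ et, pvRank kv.1 = 1 := by
  simp only [List.any_cons, List.any_nil, Bool.or_false, Bool.or_eq_true, List.any_eq_true,
    beq_iff_eq, pvRank_eq_one_iff]
  constructor
  · rintro (⟨x, hx, h⟩ | ⟨x, hx, h⟩ | ⟨x, hx, h⟩)
    · exact ⟨x, hx, Or.inl h⟩
    · exact ⟨x, hx, Or.inr (Or.inl h)⟩
    · exact ⟨x, hx, Or.inr (Or.inr h)⟩
  · rintro ⟨x, hx, h | h | h⟩
    · exact Or.inl ⟨x, hx, h⟩
    · exact Or.inr (Or.inl ⟨x, hx, h⟩)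
    · exact Or.inr (Or.inr ⟨x, hx, h⟩)

lemma pvCond2_iff (et : List (String × Int)) :
    (["REG", "MA"] : List String).any (fun k => et.any (fun kv => kv.1 == k)) = true ↔
      ∃ kv ∈ et, pvRank kv.1 = 2 := by
  simp only [List.any_cons, List.any_nil, Bool.or_false, Bool.or_eq_true, List.any_eq_true,
    beq_iff_eq, pvRank_eq_two_iff]
  constructor
  · rintro (⟨x, hx, h⟩ | ⟨x, hx, h⟩)
    · exact ⟨x, hx, Or.inl h⟩
    · exact ⟨x, hx, Or.inr h⟩
  · rintro ⟨x, hx, h | h⟩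
    · exact Or.inl ⟨x, hx, h⟩
    · exact Or.inr ⟨x, hx, h⟩

lemma pvCond3_iff (et : List (String × Int)) :
    et.any (fun kv => kv.1 == "MACRO") = true ↔ ∃ kv ∈ et, pvRank kv.1 = 3 := by
  simp only [List.any_eq_true, beq_iff_eq, pvRank_eq_three_iff]

/-- if some member has rank r and no member has a smaller rank, the fold computes r. -/
lemma pvM_eq_of (et : List (String × Int)) (r : Int) (hr4 : r ≤ 4)
    (hex : ∃ kv ∈ et, pvRank kv.1 = r)
    (hmin : ∀ kv ∈ et, r ≤ pvRank kv.1) : pvM et 4 = r := by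
  obtain ⟨kv, hmem, hkv⟩ := hex
  have hle : pvM et 4 ≤ r := hkv ▸ pvM_le_mem et 4 kv hmem
  rcases pvM_attained et 4 with h | ⟨kv', hmem', h⟩
  · omega
  · have := hmin kv' hmem'
    omega

-- ===== VERDICT (by name: the statement is the Claim_ definition above) =====
theorem detect_horizon_spec : Claim_equal_detect_horizon := by
  intro et _
  unfold Spec_detect_horizon
  rw [detect_horizon_alt_eq]
  unfold detect_horizon
  by_cases h0 : (["EARN", "DIV"] : List String).any (fun k => et.any (fun kv => kv.1 == k)) = true
  · have hM : pvM et 4 = 0 :=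
      pvM_eq_of et 0 (by norm_num) ((pvCond0_iff et).1 h0)
        (fun kv _ => (pvRank_bounds kv.1).1)
    simp [h0, hM, pvState]
  · have n0 : ¬ ∃ kv ∈ et, pvRank kv.1 = 0 := fun h => h0 ((pvCond0_iff et).2 h)
    by_cases h1 : (["GUIDE", "PROD", "MGMT"] : List String).any (fun k => et.any (fun kv => kv.1 == k)) = true
    · have hM : pvM et 4 = 1 := by
        refine pvM_eq_of et 1 (by norm_num) ((pvCond1_iff et).1 h1) (fun kv hmem => ?_)
        have hb := (pvRank_bounds kv.1).1
        have : pvRank kv.1 ≠ 0 := fun h => n0 ⟨kv, hmem, h⟩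
        omega
      simp [h0, h1, hM, pvState]
    · have n1 : ¬ ∃ kv ∈ et, pvRank kv.1 = 1 := fun h => h1 ((pvCond1_iff et).2 h)
      by_cases h2 : (["REG", "MA"] : List String).any (fun k => et.any (fun kv => kv.1 == k)) = true
      · have hM : pvM et 4 = 2 := by
          refine pvM_eq_of et 2 (by norm_num) ((pvCond2_iff et).1 h2) (fun kv hmem => ?_)
          have hb := (pvRank_bounds kv.1).1
          have e0 : pvRank kv.1 ≠ 0 := fun h => n0 ⟨kv, hmem, h⟩
          have e1 : pvRank kv.1 ≠ 1 := fun h => n1 ⟨kv, hmem, h⟩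
          omega
        simp [h0, h1, h2, hM, pvState]
      · have n2 : ¬ ∃ kv ∈ et, pvRank kv.1 = 2 := fun h => h2 ((pvCond2_iff et).2 h)
        by_cases h3 : et.any (fun kv => kv.1 == "MACRO") = true
        · have hM : pvM et 4 = 3 := by
            refine pvM_eq_of et 3 (by norm_num) ((pvCond3_iff et).1 h3) (fun kv hmem => ?_)
            have hb := (pvRank_bounds kv.1).1
            have e0 : pvRank kv.1 ≠ 0 := fun h => n0 ⟨kv, hmem, h⟩
            have e1 : pvRank kv.1 ≠ 1 := fun h => n1 ⟨kv, hmem, h⟩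
            have e2 : pvRank kv.1 ≠ 2 := fun h => n2 ⟨kv, hmem, h⟩
            omega
          simp [h0, h1, h2, h3, hM, pvState]
        · have n3 : ¬ ∃ kv ∈ et, pvRank kv.1 = 3 := fun h => h3 ((pvCond3_iff et).2 h)
          have hM : pvM et 4 = 4 := by
            rcases pvM_attained et 4 with h | ⟨kv, hmem, h⟩
            · exact h
            · have hb := pvRank_bounds kv.1
              have e0 : pvRank kv.1 ≠ 0 := fun h => n0 ⟨kv, hmem, h⟩
              have e1 : pvRank kv.1 ≠ 1 := fun h => n1 ⟨kv, hmem, h⟩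
              have e2 : pvRank kv.1 ≠ 2 := fun h => n2 ⟨kv, hmem, h⟩
              have e3 : pvRank kv.1 ≠ 3 := fun h => n3 ⟨kv, hmem, h⟩
              omega
          simp [h0, h1, h2, h3, hM, pvState]
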